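-- pv_equiv track=rewrite | github.com/Icexbb/SekaiSubtitle-Core | lib/process.py | dialog_body_typer
-- ===== SOURCE A (Python) =====
-- def dialog_body_typer(body: str, char_interval: list[int, int] = [50, 80]):
--     return_char = ["\n", "\\n", "\\N"]
--     for c in return_char:
--         body.replace(c, "\n")
--     body_list = list(body)
--     res = []
--     next_start = 0
--     fade_time = char_interval[0]
--     char_time = char_interval[1]
--
--     for index, char in enumerate(body_list):
--         if char_interval:
--             start = next_start + (300 if char == '\n' else 0)
--             end = start + fade_time
--             r = rf"{{\alphaFF\t({start},{end},1,\alpha0)}}" + (char if char != "\n" else r"\N")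
--             res.append(r)
--             next_start = start + char_time
--         else:
--             res.append(char if char != "\n" else r"\N")
--
--     return "".join(res)
-- ===== SOURCE B (Python) =====
-- def dialog_body_typer(body: str, char_interval: list[int, int] = [50, 80]):
--     fade_time = char_interval[0]
--     char_time = char_interval[1]
--     # pass 1: timing table — nl_upto[i] = newlines among body[:i+1]
--     nl_upto = []
--     n = 0
--     for c in body:
--         if c == "\n":
--             n += 1
--         nl_upto.append(n)
--     # pass 2: closed-form start for each char, format and join
--     pieces = [
--         "{\\alphaFF\\t(%d,%d,1,\\alpha0)}%s"
--         % (char_time * i + 300 * nl_upto[i],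
--            char_time * i + 300 * nl_upto[i] + fade_time,
--            "\\N" if c == "\n" else c)
--         for i, c in enumerate(body)
--     ]
--     return "".join(pieces)
-- ===== Notes on version B (the rewrite author's own statement) =====
-- stated objective: alternative
-- what changed: Replaces A's single stateful fold carrying next_start with two passes: a prefix newline-count table plus a closed-form start (char_time*i + 300*nl_upto[i]) per index, formatted in a comprehension and joined; drops A's dead body.replace loop.
import Mathlib
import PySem

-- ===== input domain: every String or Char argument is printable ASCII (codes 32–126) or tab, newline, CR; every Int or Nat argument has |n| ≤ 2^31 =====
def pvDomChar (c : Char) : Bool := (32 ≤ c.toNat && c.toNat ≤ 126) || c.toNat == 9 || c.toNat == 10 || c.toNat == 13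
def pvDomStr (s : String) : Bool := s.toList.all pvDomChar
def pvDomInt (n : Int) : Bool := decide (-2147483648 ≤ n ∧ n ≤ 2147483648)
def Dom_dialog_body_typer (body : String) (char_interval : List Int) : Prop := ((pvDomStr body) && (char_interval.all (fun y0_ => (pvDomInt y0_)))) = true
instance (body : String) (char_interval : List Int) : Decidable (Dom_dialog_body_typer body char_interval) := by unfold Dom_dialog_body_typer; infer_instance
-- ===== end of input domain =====

-- B replaces A's stateful next_start fold by a prefix newline-count table and a
-- closed-form start per index (alternative decomposition; A's dead body.replace
-- loop, whose results are discarded, is dropped in B).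

-- ===== PORT A =====
-- A's loop body, as a helper (the 'if char_interval:' truthiness test is 'ci ≠ []')
def pvStepA (ci : List Int) (fade_time char_time : Int)
    (st : List String × Int) (ic : Int × Char) : List String × Int :=
  if ci ≠ [] then
    let start := st.2 + (if ic.2 = '\n' then 300 else 0)
    let e := start + fade_time
    let r := "{\\alphaFF\\t(" ++ PySem.Int.toStr start ++ "," ++ PySem.Int.toStr e ++ ",1,\\alpha0)}"
              ++ (if ic.2 ≠ '\n' then String.ofList [ic.2] else "\\N")
    (st.1 ++ [r], start + char_time)
  else
    (st.1 ++ [if ic.2 ≠ '\n' then String.ofList [ic.2] else "\\N"], st.2)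

-- the 'for c in return_char: body.replace(c, "\n")' loop discards its results (no-op) and is ported as nothing
def dialog_body_typer (body : String) (char_interval : List Int) : String :=
  match PySem.List.pyGet? char_interval 0, PySem.List.pyGet? char_interval 1 with
  | some fade_time, some char_time =>
      let st := (PySem.List.enumerate body.toList 0).foldl
        (pvStepA char_interval fade_time char_time) ([], 0)
      PySem.Str.join "" st.1
  | _, _ => ""  -- IndexError on char_interval[0]/[1]; excluded by Pre_

-- ===== PORT B =====
def dialog_body_typer_alt (body : String) (char_interval : List Int) : String :=
  match PySem.List.pyGet? char_interval 0 with
  | none => ""  -- IndexError on char_interval[0]; excluded by Pre_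
  | some fade_time =>
    match PySem.List.pyGet? char_interval 1 with
    | none => ""  -- IndexError on char_interval[1]; excluded by Pre_
    | some char_time =>
      -- pass 1: timing table nl_upto ('n' accumulator carried alongside the list)
      let nl_upto := (body.toList.foldl
        (fun (st : List Int × Int) c =>
          let n := st.2 + (if c = '\n' then 1 else 0)
          (st.1 ++ [n], n)) ([], 0)).1
      -- pass 2: closed-form start per index, format, join
      let pieces := (PySem.List.enumerate body.toList 0).map (fun ic =>
        let s := char_time * ic.1 + 300 * PySem.List.pyGetD nl_upto ic.1 0
        "{\\alphaFF\\t(" ++ PySem.Int.toStr s ++ "," ++ PySem.Int.toStr (s + fade_time) ++ ",1,\\alpha0)}"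
          ++ (if ic.2 = '\n' then "\\N" else String.ofList [ic.2]))
      PySem.Str.join "" pieces

-- ===== PRECONDITION & SPEC =====
-- A (and B) raise IndexError reading char_interval[0]/char_interval[1] when the list has fewer than two elements
def Pre_dialog_body_typer (body : String) (char_interval : List Int) : Prop :=
  2 ≤ char_interval.length
instance (body : String) (char_interval : List Int) : Decidable (Pre_dialog_body_typer body char_interval) := by unfold Pre_dialog_body_typer; infer_instance
def pvWitness_dialog_body_typer : String × List Int := ("a\nb", [50, 80])

def Spec_dialog_body_typer (body : String) (char_interval : List Int) (out : String) : Prop := out = dialog_body_typer_alt body char_interval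
instance (body : String) (char_interval : List Int) (out : String) : Decidable (Spec_dialog_body_typer body char_interval out) := by unfold Spec_dialog_body_typer; infer_instance

-- ===== CLAIM (what is proved, stated in full; the proofs are below) =====
def Claim_equal_dialog_body_typer : Prop := ∀ (body : String) (char_interval : List Int), Dom_dialog_body_typer body char_interval → Pre_dialog_body_typer body char_interval → Spec_dialog_body_typer body char_interval (dialog_body_typer body char_interval)

-- ===== LEMMAS AND PROOFS =====

-- the per-char tag both programs emit
def pvTag (fade s : Int) (c : Char) : String :=
  "{\\alphaFF\\t(" ++ PySem.Int.toStr s ++ "," ++ PySem.Int.toStr (s + fade) ++ ",1,\\alpha0)}"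
    ++ (if c = '\n' then "\\N" else String.ofList [c])

-- reference emission for A's loop
def pvEmit (fade ct : Int) (ns : Int) : List Char → List String
  | [] => []
  | c :: cs =>
      let s := ns + (if c = '\n' then 300 else 0)
      pvTag fade s c :: pvEmit fade ct (s + ct) cs

-- reference prefix counts for B's first pass
def pvCounts (n : Int) : List Char → List Int
  | [] => []
  | c :: cs =>
      let m := n + (if c = '\n' then 1 else 0)
      m :: pvCounts m cs

theorem pvCounts_length (n : Int) (l : List Char) : (pvCounts n l).length = l.length := by
  induction l generalizing n with
  | nil => rfl
  | cons c cs ih => simp [pvCounts, ih]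

theorem pvEmit_length (fade ct ns : Int) (l : List Char) : (pvEmit fade ct ns l).length = l.length := by
  induction l generalizing ns with
  | nil => rfl
  | cons c cs ih => simp [pvEmit, ih]

theorem pvCounts_getElem (n : Int) (l : List Char) (i : Nat) (h : i < l.length)
    (h' : i < (pvCounts n l).length) :
    (pvCounts n l)[i] = n + ((l.take (i + 1)).countP (· == '\n') : Int) := by
  induction l generalizing n i with
  | nil => simp at h
  | cons c cs ih =>
    cases i with
    | zero =>
      by_cases hc : c = '\n' <;> simp [pvCounts, List.countP_cons, hc]
    | succ j =>
      have hj : j < cs.length := by simpa using h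
      have hj' : j < (pvCounts (n + (if c = '\n' then 1 else 0)) cs).length := by
        simpa [pvCounts_length] using hj
      have e1 : (pvCounts n (c :: cs))[j + 1]'h'
          = (pvCounts (n + (if c = '\n' then 1 else 0)) cs)[j]'hj' := by
        simp [pvCounts]
      rw [e1, ih _ j hj hj']
      have e2 : (c :: cs).take (j + 1 + 1) = c :: cs.take (j + 1) := rfl
      rw [e2]
      by_cases hc : c = '\n' <;> simp [List.countP_cons, hc] <;> push_cast <;> ring

theorem pvEmit_getElem (fade ct ns : Int) (l : List Char) (i : Nat) (h : i < l.length)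
    (h' : i < (pvEmit fade ct ns l).length) :
    (pvEmit fade ct ns l)[i]
      = pvTag fade (ns + ct * i + 300 * ((l.take (i + 1)).countP (· == '\n') : Int)) l[i] := by
  induction l generalizing ns i with
  | nil => simp at h
  | cons c cs ih =>
    cases i with
    | zero =>
      by_cases hc : c = '\n' <;> simp [pvEmit, List.countP_cons, hc]
    | succ j =>
      have hj : j < cs.length := by simpa using h
      have hj' : j < (pvEmit fade ct (ns + (if c = '\n' then 300 else 0) + ct) cs).length := by
        simpa [pvEmit_length] using hj
      have e1 : (pvEmit fade ct ns (c :: cs))[j + 1]'h'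
          = (pvEmit fade ct (ns + (if c = '\n' then 300 else 0) + ct) cs)[j]'hj' := by
        simp [pvEmit]
      rw [e1, ih _ j hj hj']
      have e2 : (c :: cs).take (j + 1 + 1) = c :: cs.take (j + 1) := rfl
      have e3 : ((c :: cs)[j + 1]'h) = cs[j]'hj := by simp
      rw [e2, e3]
      congr 1
      by_cases hc : c = '\n' <;> simp [List.countP_cons, hc] <;> push_cast <;> ring

-- A's fold produces pvEmit
theorem pvA_fold (fade ct : Int) (ci : List Int) (hci : ci ≠ []) (l : List Char) :
    ∀ (s : Int) (acc : List String) (ns : Int),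
    ((PySem.List.enumerate l s).foldl (pvStepA ci fade ct) (acc, ns)).1
      = acc ++ pvEmit fade ct ns l := by
  induction l with
  | nil => intro s acc ns; simp [PySem.List.enumerate_nil, pvEmit]
  | cons c cs ih =>
    intro s acc ns
    rw [PySem.List.enumerate_cons, List.foldl_cons]
    have estep : pvStepA ci fade ct (acc, ns) (s, c)
        = (acc ++ [pvTag fade (ns + (if c = '\n' then 300 else 0)) c],
           ns + (if c = '\n' then 300 else 0) + ct) := by
      by_cases hc : c = '\n' <;> simp [pvStepA, pvTag, hci, hc]
    rw [estep, ih (s + 1)]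
    simp [pvEmit]

-- B's first pass produces pvCounts
theorem pvB_counts (l : List Char) :
    ∀ (acc : List Int) (n : Int),
    (l.foldl
        (fun (st : List Int × Int) c =>
          let m := st.2 + (if c = '\n' then 1 else 0)
          (st.1 ++ [m], m)) (acc, n)).1 = acc ++ pvCounts n l := by
  induction l with
  | nil => intro acc n; simp [pvCounts]
  | cons c cs ih => intro acc n; simp [List.foldl_cons, ih, pvCounts]

-- B's pieces list equals pvEmit … 0
theorem pvB_pieces (fade ct : Int) (l : List Char) :
    (PySem.List.enumerate l 0).map (fun ic =>
        let s := ct * ic.1 + 300 * PySem.List.pyGetD (pvCounts 0 l) ic.1 0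
        "{\\alphaFF\\t(" ++ PySem.Int.toStr s ++ "," ++ PySem.Int.toStr (s + fade) ++ ",1,\\alpha0)}"
          ++ (if ic.2 = '\n' then "\\N" else String.ofList [ic.2]))
      = pvEmit fade ct 0 l := by
  apply List.ext_getElem
  · simp [PySem.List.length_enumerate, pvEmit_length]
  · intro i h1 h2
    have hi : i < l.length := by simpa [PySem.List.length_enumerate] using h1
    have hc' : i < (pvCounts 0 l).length := by simpa [pvCounts_length] using hi
    rw [List.getElem_map, PySem.List.getElem_enumerate]
    rw [pvEmit_getElem fade ct 0 l i hi h2]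
    have hgd : PySem.List.pyGetD (pvCounts 0 l) ((0 : Int) + (i : Int)) 0
        = (pvCounts 0 l)[i] := by
      have e : ((0 : Int) + (i : Int)) = ((i : Nat) : Int) := by push_cast; ring
      rw [e, PySem.List.pyGetD_natCast]
      exact List.getD_eq_getElem _ _ hc'
    simp only [hgd, pvCounts_getElem 0 l i hi hc']
    unfold pvTag
    congr 2
    ring

-- ===== VERDICT (by name: the statement is the Claim_ definition above) =====
theorem dialog_body_typer_spec : Claim_equal_dialog_body_typer := by
  intro body ci _ hpre
  unfold Spec_dialog_body_typer dialog_body_typer dialog_body_typer_alt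
  match ci, hpre with
  | a :: b :: t, _ =>
    have hf : PySem.List.pyGet? (a :: b :: t) 0 = some a :=
      PySem.List.pyGet?_zero_cons a (b :: t)
    have ht : PySem.List.pyGet? (a :: b :: t) 1 = some b := by
      have e : (1 : Int) = (((0:Nat) : Int) + 1) := by push_cast
      rw [e, PySem.List.pyGet?_cons_succ]
      simpa using PySem.List.pyGet?_zero_cons b t
    have hci : (a :: b :: t : List Int) ≠ [] := by simp
    rw [hf, ht]
    simp only [pvA_fold a b (a :: b :: t) hci body.toList 0 [] 0,
      pvB_counts body.toList [] 0, List.nil_append, pvB_pieces a b body.toList]
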